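-- pv_equiv track=rewrite | github.com/imsaifulislam/Learning_Python | Phitron_python/05.5_module/03_practice.py | CalculateFromListData
-- ===== SOURCE A (Python) =====
-- def CalculateFromListData(listA,listB):
--     result = []
--
--     min_len = min(len(listA),len(listB))
--
--     for i in range(min_len):
--         result.append(listA[i]+listB[i])
--
--     if len(listA)>len(listB):
--         result.extend(listA[min_len:])
--     else:
--         result.extend(listB[min_len:])
--
--     return result
-- ===== SOURCE B (Python) =====
-- def CalculateFromListData(listA, listB):
--     return [
--         (listA[i] if i < len(listA) else 0) + (listB[i] if i < len(listB) else 0)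
--         for i in range(max(len(listA), len(listB)))
--     ]
-- ===== Notes on version B (the rewrite author's own statement) =====
-- stated objective: simpler
-- what changed: Replaces A's two-phase scheme (index loop over the min length, then a which-list-is-longer branch extending the tail) with one uniform comprehension over the max length that zero-pads the shorter list.
import Mathlib
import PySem

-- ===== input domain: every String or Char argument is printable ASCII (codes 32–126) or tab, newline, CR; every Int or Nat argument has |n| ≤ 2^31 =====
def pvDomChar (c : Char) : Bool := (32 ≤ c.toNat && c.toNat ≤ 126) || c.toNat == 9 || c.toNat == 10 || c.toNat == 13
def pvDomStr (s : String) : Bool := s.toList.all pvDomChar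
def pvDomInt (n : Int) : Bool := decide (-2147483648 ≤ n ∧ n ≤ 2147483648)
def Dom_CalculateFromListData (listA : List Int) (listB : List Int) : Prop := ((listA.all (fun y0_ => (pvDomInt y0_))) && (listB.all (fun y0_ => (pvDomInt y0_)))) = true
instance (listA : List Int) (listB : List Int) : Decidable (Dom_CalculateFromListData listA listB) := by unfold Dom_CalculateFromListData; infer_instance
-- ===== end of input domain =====

-- B replaces A's two-phase scheme (index loop to min length, then a longer-list branch
-- extending the tail) with one uniform zero-padded comprehension over the max length (simpler).

-- ===== PORT A =====
def CalculateFromListData (listA : List Int) (listB : List Int) : List Int :=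
  let minLen : Nat := min listA.length listB.length
  let result := (PySem.List.pyRange 0 (minLen : Int) 1).foldl
    (fun r i => r ++ [PySem.List.pyGetD listA i 0 + PySem.List.pyGetD listB i 0]) []
  if listA.length > listB.length then
    result ++ PySem.List.slice listA (some (minLen : Int)) none
  else
    result ++ PySem.List.slice listB (some (minLen : Int)) none

-- ===== PORT B =====
def CalculateFromListData_alt (listA : List Int) (listB : List Int) : List Int :=
  (PySem.List.pyRange 0 ((max listA.length listB.length : Nat) : Int) 1).map (fun i =>
    (if i < (listA.length : Int) then PySem.List.pyGetD listA i 0 else 0)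
      + (if i < (listB.length : Int) then PySem.List.pyGetD listB i 0 else 0))

-- ===== PRECONDITION & SPEC =====
def Spec_CalculateFromListData (listA : List Int) (listB : List Int) (out : List Int) : Prop := out = CalculateFromListData_alt listA listB
instance (listA : List Int) (listB : List Int) (out : List Int) : Decidable (Spec_CalculateFromListData listA listB out) := by unfold Spec_CalculateFromListData; infer_instance

-- ===== CLAIM (what is proved, stated in full; the proofs are below) =====
def Claim_equal_CalculateFromListData : Prop := ∀ (listA : List Int) (listB : List Int), Dom_CalculateFromListData listA listB → Spec_CalculateFromListData listA listB (CalculateFromListData listA listB)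

-- ===== LEMMAS AND PROOFS =====

-- common closed form: pointwise sums of the common prefix, then the longer tail
-- (exactly one of the two drops is nonempty)
def mergeSum (a b : List Int) : List Int :=
  List.zipWith (· + ·) a b ++ a.drop b.length ++ b.drop a.length

lemma map_range_getD (b : List Int) :
    (List.range b.length).map (fun k => b.getD k 0) = b := by
  induction b with
  | nil => simp
  | cons y b ih =>
    rw [List.length_cons, List.range_succ_eq_map, List.map_cons, List.map_map]
    simp only [List.getD, Function.comp_def, List.getElem?_cons_succ, List.getElem?_cons_zero,
      Option.getD_some]
    exact congrArg _ ih

lemma map_range_max_getD_add (a b : List Int) :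
    (List.range (max a.length b.length)).map (fun k => a.getD k 0 + b.getD k 0)
      = mergeSum a b := by
  induction a generalizing b with
  | nil => simpa [mergeSum] using map_range_getD b
  | cons x a ih =>
    cases b with
    | nil =>
      simpa [mergeSum] using map_range_getD (x :: a)
    | cons y b =>
      have hm : max (x :: a).length (y :: b).length = (max a.length b.length) + 1 := by
        simp [Nat.succ_max_succ]
      rw [hm, List.range_succ_eq_map, List.map_cons, List.map_map]
      simp only [List.getD, Function.comp_def, List.getElem?_cons_succ, List.getElem?_cons_zero,
        Option.getD_some, mergeSum, List.zipWith_cons_cons, List.length_cons, List.drop_succ_cons,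
        List.cons_append]
      exact congrArg _ (ih b)

lemma map_range_min_getD_add (a b : List Int) :
    (List.range (min a.length b.length)).map (fun k => a.getD k 0 + b.getD k 0)
      = List.zipWith (· + ·) a b := by
  induction a generalizing b with
  | nil => simp
  | cons x a ih =>
    cases b with
    | nil => simp
    | cons y b =>
      have hm : min (x :: a).length (y :: b).length = (min a.length b.length) + 1 := by
        simp [Nat.succ_min_succ]
      rw [hm, List.range_succ_eq_map, List.map_cons, List.map_map]
      simp only [List.getD, Function.comp_def, List.getElem?_cons_succ, List.getElem?_cons_zero,
        Option.getD_some, List.zipWith_cons_cons]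
      exact congrArg _ (ih b)

-- port A computes the closed form
lemma portA_eq_mergeSum (a b : List Int) : CalculateFromListData a b = mergeSum a b := by
  have hres : (PySem.List.pyRange 0 ((min a.length b.length : Nat) : Int) 1).foldl
      (fun r i => r ++ [PySem.List.pyGetD a i 0 + PySem.List.pyGetD b i 0]) []
        = List.zipWith (· + ·) a b := by
    rw [PySem.List.foldl_append_singleton_eq_map, PySem.List.pyRange_zero_natCast, List.map_map]
    simpa [Function.comp_def] using map_range_min_getD_add a b
  unfold CalculateFromListData mergeSum
  simp only [hres, PySem.List.slice_from_natCast]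
  split_ifs with h
  · have hb : b.drop a.length = [] := List.drop_eq_nil_of_le (by omega)
    have hmin : min a.length b.length = b.length := by omega
    simp [hmin, hb]
  · have ha : a.drop b.length = [] := List.drop_eq_nil_of_le (by omega)
    have hmin : min a.length b.length = a.length := by omega
    simp [hmin, ha]

-- port B computes the closed form
lemma portB_eq_mergeSum (a b : List Int) : CalculateFromListData_alt a b = mergeSum a b := by
  unfold CalculateFromListData_alt
  rw [PySem.List.pyRange_zero_natCast, List.map_map]
  have hfun : ∀ k : Nat,
      ((fun i => (if i < (a.length : Int) then PySem.List.pyGetD a i 0 else 0)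
        + (if i < (b.length : Int) then PySem.List.pyGetD b i 0 else 0)) ∘ (fun k : Nat => (k : Int))) k
        = a.getD k 0 + b.getD k 0 := by
    intro k
    simp only [Function.comp_apply, PySem.List.pyGetD_natCast]
    have ca : (if (k : Int) < (a.length : Int) then a.getD k 0 else 0) = a.getD k 0 := by
      split_ifs with h
      · rfl
      · have : a.length ≤ k := by exact_mod_cast not_lt.mp h
        simp [List.getD, List.getElem?_eq_none this]
    have cb : (if (k : Int) < (b.length : Int) then b.getD k 0 else 0) = b.getD k 0 := by
      split_ifs with h
      · rfl
      · have : b.length ≤ k := by exact_mod_cast not_lt.mp h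
        simp [List.getD, List.getElem?_eq_none this]
    rw [ca, cb]
  rw [List.map_congr_left (fun k _ => hfun k)]
  exact map_range_max_getD_add a b

-- ===== VERDICT (by name: the statement is the Claim_ definition above) =====
theorem CalculateFromListData_spec : Claim_equal_CalculateFromListData := by
  intro a b _
  unfold Spec_CalculateFromListData
  rw [portA_eq_mergeSum, portB_eq_mergeSum]
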